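-- pv_equiv track=rewrite | github.com/teotiarahul-git/native-brand-tracker | shared/amazon_pi_collector.py | merge_data_rows
-- ===== SOURCE A (Python) =====
-- def merge_data_rows(existing_rows, new_rows, date_col=0):
--     """
--     Upsert: overwrite rows with matching date key, append new ones.
--     Returns merged list sorted by date key.
--     """
--     by_date = {}
--     for row in existing_rows:
--         if row and row[date_col]:
--             by_date[row[date_col]] = row
--     for row in new_rows:
--         if row and row[date_col]:
--             by_date[row[date_col]] = row
--     return [by_date[k] for k in sorted(by_date.keys())]
-- ===== SOURCE B (Python) =====
-- def merge_data_rows(existing_rows, new_rows, date_col=0):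
--     """Stable-sort the filtered concatenation by date key, then one adjacent-comparison
--     pass keeps the last row of each run of equal keys (stability => last writer wins)."""
--     rows = [row for row in existing_rows + new_rows if row and row[date_col]]
--     rows.sort(key=lambda row: row[date_col])
--     merged = []
--     prev = None
--     for row in rows:
--         if prev is not None and prev[date_col] != row[date_col]:
--             merged.append(prev)
--         prev = row
--     if prev is not None:
--         merged.append(prev)
--     return merged
-- ===== Notes on version B (the rewrite author's own statement) =====
-- stated objective: alternative
-- what changed: A upserts rows into a dict keyed by date and then looks each sorted key back up; B keeps no keyed structure at all: it stable-sorts the filtered concatenation by the date key and then makes one adjacent-comparison pass keeping the last row of each run of equal keys (stability makes that the last writer).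
import Mathlib
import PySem

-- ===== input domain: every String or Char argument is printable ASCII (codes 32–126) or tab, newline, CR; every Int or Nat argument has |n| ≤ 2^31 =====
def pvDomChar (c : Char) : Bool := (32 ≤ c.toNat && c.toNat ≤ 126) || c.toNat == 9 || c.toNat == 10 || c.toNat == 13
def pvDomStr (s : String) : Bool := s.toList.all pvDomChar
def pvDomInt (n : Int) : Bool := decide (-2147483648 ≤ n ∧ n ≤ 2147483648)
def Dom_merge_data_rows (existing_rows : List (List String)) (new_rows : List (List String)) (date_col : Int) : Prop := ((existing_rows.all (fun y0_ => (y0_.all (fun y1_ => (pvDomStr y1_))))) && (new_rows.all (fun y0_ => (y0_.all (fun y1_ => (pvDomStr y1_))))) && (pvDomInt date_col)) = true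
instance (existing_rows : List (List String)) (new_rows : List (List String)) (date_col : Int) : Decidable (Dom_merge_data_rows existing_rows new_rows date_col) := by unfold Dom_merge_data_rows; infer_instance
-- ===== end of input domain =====

-- B replaces A's dict upsert + sorted-keys lookup by a stable sort of the filtered concatenation followed by one
-- adjacent-comparison pass that keeps the last row of each run of equal date keys (objective: alternative).

-- ===== PORT A =====
def merge_data_rows (existing_rows : List (List String)) (new_rows : List (List String)) (date_col : Int) : List (List String) :=
  let d1 := existing_rows.foldl (fun d row =>
    if row ≠ [] ∧ PySem.List.pyGetD row date_col "" ≠ "" then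
      d.insert (PySem.List.pyGetD row date_col "") row else d) PySem.Dict.empty
  let d2 := new_rows.foldl (fun d row =>
    if row ≠ [] ∧ PySem.List.pyGetD row date_col "" ≠ "" then
      d.insert (PySem.List.pyGetD row date_col "") row else d) d1
  (PySem.List.sorted d2.keys (fun k => k) false).map (fun k => d2.getD k [])

-- ===== PORT B =====
-- the 'for row in rows' loop of Source B: state = (merged, prev); appends prev when the key changes
def mergeStep (date_col : Int) (st : List (List String) × Option (List String)) (row : List String) :
    List (List String) × Option (List String) :=
  (match st.2 with
   | some p => if PySem.List.pyGetD p date_col "" ≠ PySem.List.pyGetD row date_col "" then st.1 ++ [p] else st.1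
   | none => st.1, some row)

def merge_data_rows_alt (existing_rows : List (List String)) (new_rows : List (List String)) (date_col : Int) : List (List String) :=
  let rows0 := (existing_rows ++ new_rows).filter
    (fun row => decide (row ≠ [] ∧ PySem.List.pyGetD row date_col "" ≠ ""))
  let rows := PySem.List.sorted rows0 (fun row => PySem.List.pyGetD row date_col "") false
  let st := rows.foldl (mergeStep date_col) ([], none)
  match st.2 with
  | some p => st.1 ++ [p]
  | none => st.1

-- ===== PRECONDITION & SPEC =====
-- Pre_ excludes exactly the inputs on which Python A raises IndexError: a nonempty row whose date_col index is out of range.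
def Pre_merge_data_rows (existing_rows : List (List String)) (new_rows : List (List String)) (date_col : Int) : Prop :=
  ∀ row ∈ existing_rows ++ new_rows, row ≠ [] → PySem.Raise.InRange row.length date_col
instance (existing_rows : List (List String)) (new_rows : List (List String)) (date_col : Int) : Decidable (Pre_merge_data_rows existing_rows new_rows date_col) := by unfold Pre_merge_data_rows; infer_instance

def pvWitness_merge_data_rows : List (List String) × List (List String) × Int :=
  ([["2021-01-01", "3"], ["2021-01-02", "4"]], [["2021-01-02", "9"], ["2021-01-03", "1"]], 0)

def Spec_merge_data_rows (existing_rows : List (List String)) (new_rows : List (List String)) (date_col : Int) (out : List (List String)) : Prop := out = merge_data_rows_alt existing_rows new_rows date_col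
instance (existing_rows : List (List String)) (new_rows : List (List String)) (date_col : Int) (out : List (List String)) : Decidable (Spec_merge_data_rows existing_rows new_rows date_col out) := by unfold Spec_merge_data_rows; infer_instance

-- ===== CLAIM (what is proved, stated in full; the proofs are below) =====
def Claim_equal_merge_data_rows : Prop := ∀ (existing_rows : List (List String)) (new_rows : List (List String)) (date_col : Int), Dom_merge_data_rows existing_rows new_rows date_col → Pre_merge_data_rows existing_rows new_rows date_col → Spec_merge_data_rows existing_rows new_rows date_col (merge_data_rows existing_rows new_rows date_col)

-- ===== LEMMAS AND PROOFS =====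

-- the row's date key, A's static guard, as proof-side abbreviations
def pvKey (date_col : Int) (row : List String) : String := PySem.List.pyGetD row date_col ""
def pvG (date_col : Int) (row : List String) : Bool := decide (row ≠ [] ∧ pvKey date_col row ≠ "")

-- A's guarded dict loop = plain insert loop over the filtered list
theorem dfold_filter (dc : Int) (L : List (List String)) (d0 : PySem.Dict String (List String)) :
    L.foldl (fun d row => if row ≠ [] ∧ PySem.List.pyGetD row dc "" ≠ "" then d.insert (PySem.List.pyGetD row dc "") row else d) d0
    = (L.filter (pvG dc)).foldl (fun d row => d.insert (pvKey dc row) row) d0 := by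
  induction L generalizing d0 with
  | nil => rfl
  | cons r L ih =>
    by_cases h : r ≠ [] ∧ PySem.List.pyGetD r dc "" ≠ ""
    · simp [List.foldl_cons, List.filter_cons, pvG, pvKey, h, ih]
    · simp [List.foldl_cons, List.filter_cons, pvG, pvKey, h, ih]

-- lookup in the folded dict = LAST matching row of the filtered list (find? on its reverse)
theorem dfold_get? (dc : Int) (F : List (List String)) (d0 : PySem.Dict String (List String)) (k : String) :
    (F.foldl (fun d row => d.insert (pvKey dc row) row) d0).get? k
    = (F.reverse.find? (fun row => pvKey dc row == k)).or (d0.get? k) := by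
  induction F generalizing d0 with
  | nil => simp
  | cons r F ih =>
    simp only [List.foldl_cons, List.reverse_cons, List.find?_append, ih, Option.or_assoc]
    congr 1
    by_cases h : pvKey dc r = k
    · simp [List.find?, h, PySem.Dict.get?_insert]
    · rw [PySem.Dict.get?_insert, if_neg (Ne.symm h)]
      have hb : (pvKey dc r == k) = false := by simpa using h
      simp [List.find?, hb]

-- B's adjacent-comparison fold = a direct "keep r when the next key differs" recursion
def runLast (dc : Int) : List (List String) → List (List String)
  | [] => []
  | r :: t =>
    match t with
    | [] => [r]
    | r' :: _ => if pvKey dc r ≠ pvKey dc r' then r :: runLast dc t else runLast dc t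

theorem fold_runLast (dc : Int) (L : List (List String)) (m : List (List String)) (p : List String) :
    (match (L.foldl (mergeStep dc) (m, some p)).2 with
     | some q => (L.foldl (mergeStep dc) (m, some p)).1 ++ [q]
     | none => (L.foldl (mergeStep dc) (m, some p)).1)
    = m ++ runLast dc (p :: L) := by
  induction L generalizing m p with
  | nil => simp [runLast]
  | cons r t ih =>
    by_cases h : PySem.List.pyGetD p dc "" ≠ PySem.List.pyGetD r dc ""
    · simp only [List.foldl_cons, mergeStep, h, if_pos, ih]
      simp [runLast, pvKey, h]
    · simp only [List.foldl_cons, mergeStep, if_neg h, ih]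
      simp [runLast, pvKey, h]

theorem runLast_subset (dc : Int) (L : List (List String)) (x : List String) (hx : x ∈ runLast dc L) : x ∈ L := by
  induction L with
  | nil => simpa [runLast] using hx
  | cons r t ih =>
    cases t with
    | nil => simpa [runLast] using hx
    | cons r' t' =>
      rw [runLast] at hx
      by_cases h : pvKey dc r ≠ pvKey dc r'
      · rw [if_pos h] at hx
        rcases List.mem_cons.mp hx with h' | h'
        · exact h' ▸ List.mem_cons_self
        · exact List.mem_cons_of_mem _ (ih h')
      · rw [if_neg h] at hx
        exact List.mem_cons_of_mem _ (ih hx)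

theorem runLast_pairwise (dc : Int) (L : List (List String))
    (hL : L.Pairwise (fun a b => pvKey dc a ≤ pvKey dc b)) :
    (runLast dc L).Pairwise (fun a b => pvKey dc a < pvKey dc b) := by
  induction L with
  | nil => simp [runLast]
  | cons r t ih =>
    cases t with
    | nil => simp [runLast]
    | cons r' t' =>
      have hr := List.pairwise_cons.mp hL
      have ih' := ih hr.2
      rw [runLast]
      by_cases h : pvKey dc r ≠ pvKey dc r'
      · rw [if_pos h]
        refine List.pairwise_cons.mpr ⟨?_, ih'⟩
        intro z hz
        have hz' := runLast_subset dc _ z hz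
        have hlt : pvKey dc r < pvKey dc r' := lt_of_le_of_ne (hr.1 r' List.mem_cons_self) h
        rcases List.mem_cons.mp hz' with h' | h'
        · exact h' ▸ hlt
        · exact lt_of_lt_of_le hlt ((List.pairwise_cons.mp hr.2).1 z h')
      · rw [if_neg h]; exact ih'

theorem mem_runLast (dc : Int) (L : List (List String))
    (hL : L.Pairwise (fun a b => pvKey dc a ≤ pvKey dc b)) (x : List String) :
    x ∈ runLast dc L ↔ L.reverse.find? (fun r => pvKey dc r == pvKey dc x) = some x := by
  induction L with
  | nil => simp [runLast]
  | cons r t ih =>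
    have hr := List.pairwise_cons.mp hL
    have ih' := ih hr.2
    rw [List.reverse_cons, List.find?_append]
    cases t with
    | nil =>
      simp only [runLast, List.mem_singleton, List.reverse_nil, List.find?_nil, Option.none_or]
      constructor
      · rintro rfl; simp [List.find?]
      · intro hf
        by_cases hk : pvKey dc r = pvKey dc x
        · exact (by simpa [List.find?, hk] using hf : r = x).symm
        · have hb : (pvKey dc r == pvKey dc x) = false := by simpa using hk
          simp [List.find?, hb] at hf
    | cons r' t' =>
      rw [runLast]
      by_cases h : pvKey dc r ≠ pvKey dc r'
      · rw [if_pos h]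
        have hlt : ∀ z ∈ r' :: t', pvKey dc r < pvKey dc z := by
          intro z hz
          have hlt0 : pvKey dc r < pvKey dc r' := lt_of_le_of_ne (hr.1 r' List.mem_cons_self) h
          rcases List.mem_cons.mp hz with h' | h'
          · exact h' ▸ hlt0
          · exact lt_of_lt_of_le hlt0 ((List.pairwise_cons.mp hr.2).1 z h')
        constructor
        · intro hx
          rcases List.mem_cons.mp hx with rfl | hx'
          · have hnone : (r' :: t').reverse.find? (fun q => pvKey dc q == pvKey dc x) = none := by
              rw [List.find?_eq_none]
              intro z hz
              have := hlt z (List.mem_reverse.mp hz)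
              simpa using (ne_of_gt this)
            rw [hnone]; simp [List.find?]
          · rw [ih'.mp hx']; simp
        · intro hf
          cases hfind : (r' :: t').reverse.find? (fun q => pvKey dc q == pvKey dc x) with
          | some y =>
            rw [hfind] at hf
            have hyx : y = x := by simpa using hf
            exact List.mem_cons_of_mem _ (ih'.mpr (hyx ▸ hfind))
          | none =>
            rw [hfind] at hf
            simp only [Option.none_or] at hf
            by_cases hk : pvKey dc r = pvKey dc x
            · have : r = x := by simpa [List.find?, hk] using hf
              exact this ▸ List.mem_cons_self
            · have hb : (pvKey dc r == pvKey dc x) = false := by simpa using hk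
              simp [List.find?, hb] at hf
      · rw [if_neg h]
        rw [ne_eq, not_not] at h
        rw [ih']
        constructor
        · intro hf; rw [hf]; simp
        · intro hf
          cases hfind : (r' :: t').reverse.find? (fun q => pvKey dc q == pvKey dc x) with
          | some y =>
            rw [hfind] at hf
            have hyx : y = x := by simpa using hf
            exact congrArg some hyx
          | none =>
            exfalso
            have hnone : ∀ z ∈ (r' :: t').reverse, ¬ (pvKey dc z == pvKey dc x) = true :=
              List.find?_eq_none.mp hfind
            rw [hfind] at hf
            simp only [Option.none_or] at hf
            by_cases hk : pvKey dc r = pvKey dc x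
            · exact hnone r' (List.mem_reverse.mpr List.mem_cons_self) (by simp [← h, hk])
            · have hb : (pvKey dc r == pvKey dc x) = false := by simpa using hk
              simp [List.find?, hb] at hf

-- find? of a list = head of its filtered list
theorem find?_eq_head?_filter' {α : Type} (p : α → Bool) (l : List α) :
    l.find? p = (l.filter p).head? := by
  induction l with
  | nil => rfl
  | cons a t ih =>
    cases h : p a with
    | true => rw [List.find?_cons_of_pos h, List.filter_cons_of_pos h]; rfl
    | false =>
      rw [List.find?_cons_of_neg (by simp [h]), List.filter_cons_of_neg (by simp [h]), ih]

-- keys of the folded dict, for Nodup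
theorem dfold_keys (dc : Int) (F : List (List String)) :
    (F.foldl (fun d row => d.insert (pvKey dc row) row) PySem.Dict.empty).keys
    = PySem.Set.ofList (F.map (pvKey dc)) := by
  rw [PySem.Dict.keys_foldl_insert_key F (pvKey dc) (fun _ row => row) PySem.Dict.empty]
  simp [PySem.Set.update_nil_left]

-- STABILITY of PySem.List.sorted: filtering one key class commutes with sorting
theorem filter_insertBy (dc : Int) (k : String) (x : List String) (ys : List (List String))
    (hys : ys.Pairwise (fun a b => pvKey dc a ≤ pvKey dc b)) :
    (PySem.List.insertBy (fun a b => decide (pvKey dc a < pvKey dc b)) x ys).filter (fun r => pvKey dc r == k)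
    = if pvKey dc x == k then ys.filter (fun r => pvKey dc r == k) ++ [x]
      else ys.filter (fun r => pvKey dc r == k) := by
  induction ys with
  | nil =>
    by_cases hk : pvKey dc x = k
    · simp [PySem.List.insertBy, List.filter, hk]
    · simp [PySem.List.insertBy, List.filter, hk]
  | cons y ys ih =>
    have hy := List.pairwise_cons.mp hys
    rw [PySem.List.insertBy]
    by_cases hlt : pvKey dc x < pvKey dc y
    · rw [if_pos (by simpa using hlt)]
      by_cases hk : pvKey dc x = k
      · have hnone : (y :: ys).filter (fun r => pvKey dc r == k) = [] := by
          rw [List.filter_eq_nil_iff]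
          intro z hz
          have hzk : pvKey dc x < pvKey dc z := by
            rcases List.mem_cons.mp hz with rfl | hz'
            · exact hlt
            · exact lt_of_lt_of_le hlt (hy.1 z hz')
          simp only [← hk]
          simpa using (ne_of_gt hzk)
        have hbx : (pvKey dc x == k) = true := by simpa using hk
        rw [List.filter_cons, hbx, hnone]
        simp
      · have hbx : (pvKey dc x == k) = false := by simpa using hk
        rw [List.filter_cons, hbx]
        simp
    · rw [if_neg (by simpa using hlt)]
      rw [List.filter_cons, List.filter_cons, ih hy.2]
      by_cases hxk : pvKey dc x = k <;> by_cases hyk : pvKey dc y = k <;>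
        simp [hxk, hyk]

theorem sorted_stable_filter (dc : Int) (k : String) (xs : List (List String)) :
    (PySem.List.sorted xs (fun row => pvKey dc row) false).filter (fun r => pvKey dc r == k)
    = xs.filter (fun r => pvKey dc r == k) := by
  induction xs using List.reverseRecOn with
  | nil => simp [PySem.List.sorted_eq_foldl_insertBy]
  | append_singleton xs x ih =>
    have hstep : PySem.List.sorted (xs ++ [x]) (fun row => pvKey dc row) false
        = PySem.List.insertBy (fun a b => decide (pvKey dc a < pvKey dc b)) x
            (PySem.List.sorted xs (fun row => pvKey dc row) false) := by
      rw [PySem.List.sorted_eq_foldl_insertBy, PySem.List.sorted_eq_foldl_insertBy, List.foldl_append]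
      rfl
    rw [hstep, filter_insertBy dc k x _ (PySem.List.sorted_pairwise xs (fun row => pvKey dc row)), ih,
      List.filter_append]
    by_cases hk : pvKey dc x = k
    · have hbx : (pvKey dc x == k) = true := by simpa using hk
      simp [List.filter, hbx]
    · have hbx : (pvKey dc x == k) = false := by simpa using hk
      simp [List.filter, hbx]

-- ===== VERDICT (by name: the statement is the Claim_ definition above) =====
theorem merge_data_rows_spec : Claim_equal_merge_data_rows := by
  intro e n dc _ _
  unfold Spec_merge_data_rows
  simp only [merge_data_rows, merge_data_rows_alt]
  rw [← List.foldl_append, dfold_filter]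
  set F := (e ++ n).filter (pvG dc) with hF
  set d := F.foldl (fun d row => d.insert (pvKey dc row) row) PySem.Dict.empty with hd
  set S := PySem.List.sorted F (fun row => PySem.List.pyGetD row dc "") false with hS
  set ks := PySem.List.sorted d.keys (fun k => k) false with hks
  have hFdef : (e ++ n).filter (fun row => decide (row ≠ [] ∧ PySem.List.pyGetD row dc "" ≠ "")) = F := by
    rw [hF]; rfl
  rw [hFdef]
  have hSpair : S.Pairwise (fun a b => pvKey dc a ≤ pvKey dc b) :=
    PySem.List.sorted_pairwise F (fun row => PySem.List.pyGetD row dc "")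
  -- B's output is runLast S
  have hB : (match (S.foldl (mergeStep dc) ([], none)).2 with
      | some p => (S.foldl (mergeStep dc) ([], none)).1 ++ [p]
      | none => (S.foldl (mergeStep dc) ([], none)).1) = runLast dc S := by
    cases hScases : S with
    | nil => simp [runLast]
    | cons r t =>
      have := fold_runLast dc t [] r
      simpa [List.foldl_cons, mergeStep] using this
  rw [hB]
  -- lookup facts about d
  have hget : ∀ k, d.get? k = F.reverse.find? (fun row => pvKey dc row == k) := by
    intro k; rw [hd, dfold_get?]; simp
  have hfindSF : ∀ k, S.reverse.find? (fun row => pvKey dc row == k)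
      = F.reverse.find? (fun row => pvKey dc row == k) := by
    intro k
    have hSkey : S = PySem.List.sorted F (fun row => pvKey dc row) false := by rw [hS]; rfl
    rw [find?_eq_head?_filter' (fun row => pvKey dc row == k) S.reverse,
      find?_eq_head?_filter' (fun row => pvKey dc row == k) F.reverse, List.filter_reverse,
      List.filter_reverse, hSkey, sorted_stable_filter dc k F]
  -- membership in A's output
  have hmemA : ∀ x, x ∈ ks.map (fun k => d.getD k []) ↔
      F.reverse.find? (fun row => pvKey dc row == pvKey dc x) = some x := by
    intro x
    constructor
    · intro hx
      obtain ⟨k, hk, rfl⟩ := List.mem_map.mp hx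
      have hk' : k ∈ d.keys := (PySem.List.mem_sorted d.keys (fun k => k) false k).mp (hks ▸ hk)
      have hne : d.get? k ≠ none := fun h => (PySem.Dict.get?_eq_none_iff_not_mem_keys d k).mp h hk'
      obtain ⟨v, hv⟩ := Option.ne_none_iff_exists'.mp hne
      have hfind : F.reverse.find? (fun row => pvKey dc row == k) = some v := by rw [← hget]; exact hv
      have hkv : pvKey dc v = k := by simpa using List.find?_some hfind
      have hgd : d.getD k [] = v := by rw [PySem.Dict.getD_eq_get?_getD, hv]; rfl
      rw [hgd, hkv]; exact hfind
    · intro hf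
      have hget' : d.get? (pvKey dc x) = some x := by rw [hget]; exact hf
      have hk : pvKey dc x ∈ d.keys := by
        by_contra h
        rw [← PySem.Dict.get?_eq_none_iff_not_mem_keys] at h
        rw [h] at hget'; simp at hget'
      refine List.mem_map.mpr ⟨pvKey dc x, ?_, ?_⟩
      · rw [hks, PySem.List.mem_sorted]; exact hk
      · rw [PySem.Dict.getD_eq_get?_getD, hget']; rfl
  -- membership in B's output
  have hmemB : ∀ x, x ∈ runLast dc S ↔
      F.reverse.find? (fun row => pvKey dc row == pvKey dc x) = some x := by
    intro x
    rw [mem_runLast dc S hSpair x, hfindSF]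
  -- A's output is strictly increasing on keys
  have hkeysnd : d.keys.Nodup := by rw [hd, dfold_keys]; exact PySem.Set.nodup_ofList _
  have hksnd : ks.Nodup := ((PySem.List.sorted_perm d.keys (fun k => k) false).nodup_iff).mpr hkeysnd
  have hpwA : (ks.map (fun k => d.getD k [])).Pairwise (fun a b => pvKey dc a < pvKey dc b) := by
    rw [List.pairwise_map]
    have hle : ks.Pairwise (fun a b => a ≤ b) := PySem.List.sorted_pairwise d.keys (fun k => k)
    have hlt : ks.Pairwise (fun a b => a < b) :=
      (hle.and hksnd).imp (fun h => lt_of_le_of_ne h.1 h.2)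
    refine hlt.imp_of_mem ?_
    intro a b ha hb hab
    have hka : pvKey dc (d.getD a []) = a := by
      have ha' : a ∈ d.keys := (PySem.List.mem_sorted d.keys (fun k => k) false a).mp (hks ▸ ha)
      have hne : d.get? a ≠ none := fun h => (PySem.Dict.get?_eq_none_iff_not_mem_keys d a).mp h ha'
      obtain ⟨v, hv⟩ := Option.ne_none_iff_exists'.mp hne
      have hfind : F.reverse.find? (fun row => pvKey dc row == a) = some v := by rw [← hget]; exact hv
      have hkv : pvKey dc v = a := by simpa using List.find?_some hfind
      rw [PySem.Dict.getD_eq_get?_getD, hv]; exact hkv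
    have hkb : pvKey dc (d.getD b []) = b := by
      have hb' : b ∈ d.keys := (PySem.List.mem_sorted d.keys (fun k => k) false b).mp (hks ▸ hb)
      have hne : d.get? b ≠ none := fun h => (PySem.Dict.get?_eq_none_iff_not_mem_keys d b).mp h hb'
      obtain ⟨v, hv⟩ := Option.ne_none_iff_exists'.mp hne
      have hfind : F.reverse.find? (fun row => pvKey dc row == b) = some v := by rw [← hget]; exact hv
      have hkv : pvKey dc v = b := by simpa using List.find?_some hfind
      rw [PySem.Dict.getD_eq_get?_getD, hv]; exact hkv
    rw [hka, hkb]; exact hab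
  have hpwB : (runLast dc S).Pairwise (fun a b => pvKey dc a < pvKey dc b) :=
    runLast_pairwise dc S hSpair
  have hndA : (ks.map (fun k => d.getD k [])).Nodup :=
    hpwA.imp (fun h => fun he => absurd (he ▸ h) (lt_irrefl _))
  have hndB : (runLast dc S).Nodup :=
    hpwB.imp (fun h => fun he => absurd (he ▸ h) (lt_irrefl _))
  have hperm : (ks.map (fun k => d.getD k [])).Perm (runLast dc S) :=
    (List.perm_ext_iff_of_nodup hndA hndB).mpr (fun x => (hmemA x).trans (hmemB x).symm)
  have h1 : PySem.List.sorted (runLast dc S) (fun row => pvKey dc row) false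
      = ks.map (fun k => d.getD k []) :=
    PySem.List.sorted_eq_of_perm_of_pairwise_lt (runLast dc S) (ks.map (fun k => d.getD k []))
      (fun row => pvKey dc row) hperm hpwA
  have h2 : PySem.List.sorted (runLast dc S) (fun row => pvKey dc row) false = runLast dc S :=
    PySem.List.sorted_eq_self_of_pairwise (runLast dc S) (fun row => pvKey dc row)
      (hpwB.imp le_of_lt)
  rw [← h1, h2]
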